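-- pv_equiv track=rewrite | github.com/utkususoy/crawler | main.py | html_name_class_mapper
-- ===== SOURCE A (Python) =====
-- def html_name_class_mapper(html_element_name):
--     html_classes = {
--         "heading": ["h1", "h2", "h3", "h4", "h5", "h6"],
--         "text": ["p", "br", "hr", "span", "b"],
--         "list": ["ul", "ol", "li", "dl", "dt", "dd"],
--         "link": ["a", "link"],
--         "meta": ["head", "meta"],
--         "table": ["table", "tr", "td"],
--         "media": ["img", "audio", "video"],
--         "form": ["form", "input", "button", "label", "select", "textarea"],
--         "container": ["div", "header", "footer", "nav", "main", "article", "section", "aside", "figure",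
--                       "figcaption"]
--     }
--     for html_class, elements in html_classes.items():
--         if html_element_name in elements: return html_class
--     return "unknown"
-- ===== SOURCE B (Python) =====
-- _CATEGORY_OF = {
--     "h1": "heading", "h2": "heading", "h3": "heading", "h4": "heading",
--     "h5": "heading", "h6": "heading",
--     "p": "text", "br": "text", "hr": "text", "span": "text", "b": "text",
--     "ul": "list", "ol": "list", "li": "list", "dl": "list", "dt": "list",
--     "dd": "list",
--     "a": "link", "link": "link",
--     "head": "meta", "meta": "meta",
--     "table": "table", "tr": "table", "td": "table",
--     "img": "media", "audio": "media", "video": "media",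
--     "form": "form", "input": "form", "button": "form", "label": "form",
--     "select": "form", "textarea": "form",
--     "div": "container", "header": "container", "footer": "container",
--     "nav": "container", "main": "container", "article": "container",
--     "section": "container", "aside": "container", "figure": "container",
--     "figcaption": "container",
-- }
--
--
-- def html_name_class_mapper(html_element_name):
--     return _CATEGORY_OF.get(html_element_name, "unknown")
-- ===== Notes on version B (the rewrite author's own statement) =====
-- stated objective: idiomatic
-- what changed: Replaces the per-category list-membership scan with a precomputed flat element->category dict and a single .get lookup with the default fallback.
import Mathlib
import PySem

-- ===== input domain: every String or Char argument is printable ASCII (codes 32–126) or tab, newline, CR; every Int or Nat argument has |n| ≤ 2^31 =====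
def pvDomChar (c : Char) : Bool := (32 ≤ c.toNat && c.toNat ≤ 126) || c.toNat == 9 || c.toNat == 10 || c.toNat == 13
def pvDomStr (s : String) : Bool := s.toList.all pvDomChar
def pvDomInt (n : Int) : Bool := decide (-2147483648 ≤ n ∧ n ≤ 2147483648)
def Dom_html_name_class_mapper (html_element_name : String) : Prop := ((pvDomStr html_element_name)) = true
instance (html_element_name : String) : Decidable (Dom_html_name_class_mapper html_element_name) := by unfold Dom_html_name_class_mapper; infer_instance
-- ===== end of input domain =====

set_option maxRecDepth 4000
set_option maxHeartbeats 2000000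


-- B replaces A's loop over category lists by a precomputed flat element->category
-- dict and a single .get with the "unknown" default (more idiomatic).

-- ===== PORT A =====
-- A's dict literal of category -> element lists
def pvHtmlClasses : PySem.Dict String (List String) := PySem.Dict.ofList [
  ("heading", ["h1", "h2", "h3", "h4", "h5", "h6"]),
  ("text", ["p", "br", "hr", "span", "b"]),
  ("list", ["ul", "ol", "li", "dl", "dt", "dd"]),
  ("link", ["a", "link"]),
  ("meta", ["head", "meta"]),
  ("table", ["table", "tr", "td"]),
  ("media", ["img", "audio", "video"]),
  ("form", ["form", "input", "button", "label", "select", "textarea"]),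
  ("container", ["div", "header", "footer", "nav", "main", "article", "section", "aside", "figure", "figcaption"])]

-- A's for-loop with early return over html_classes.items()
def pvMapperLoop (html_element_name : String) : List (String × List String) → String
  | [] => "unknown"
  | (html_class, elements) :: rest =>
      if html_element_name ∈ elements then html_class
      else pvMapperLoop html_element_name rest

def html_name_class_mapper (html_element_name : String) : String :=
  pvMapperLoop html_element_name pvHtmlClasses.items

-- ===== PORT B =====
-- B's module-level flat element -> category dict
def pvCategoryOf : PySem.Dict String String := PySem.Dict.ofList [
  ("h1", "heading"), ("h2", "heading"), ("h3", "heading"), ("h4", "heading"),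
  ("h5", "heading"), ("h6", "heading"),
  ("p", "text"), ("br", "text"), ("hr", "text"), ("span", "text"), ("b", "text"),
  ("ul", "list"), ("ol", "list"), ("li", "list"), ("dl", "list"), ("dt", "list"),
  ("dd", "list"),
  ("a", "link"), ("link", "link"),
  ("head", "meta"), ("meta", "meta"),
  ("table", "table"), ("tr", "table"), ("td", "table"),
  ("img", "media"), ("audio", "media"), ("video", "media"),
  ("form", "form"), ("input", "form"), ("button", "form"), ("label", "form"),
  ("select", "form"), ("textarea", "form"),
  ("div", "container"), ("header", "container"), ("footer", "container"),
  ("nav", "container"), ("main", "container"), ("article", "container"),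
  ("section", "container"), ("aside", "container"), ("figure", "container"),
  ("figcaption", "container")]

def html_name_class_mapper_alt (html_element_name : String) : String :=
  pvCategoryOf.getD html_element_name "unknown"

-- ===== PRECONDITION & SPEC =====
def Spec_html_name_class_mapper (html_element_name : String) (out : String) : Prop := out = html_name_class_mapper_alt html_element_name
instance (html_element_name : String) (out : String) : Decidable (Spec_html_name_class_mapper html_element_name out) := by unfold Spec_html_name_class_mapper; infer_instance

-- ===== CLAIM (what is proved, stated in full; the proofs are below) =====
def Claim_equal_html_name_class_mapper : Prop := ∀ (html_element_name : String), Dom_html_name_class_mapper html_element_name → Spec_html_name_class_mapper html_element_name (html_name_class_mapper html_element_name)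

-- ===== LEMMAS AND PROOFS =====

-- ===== VERDICT (by name: the statement is the Claim_ definition above) =====
theorem html_name_class_mapper_spec : Claim_equal_html_name_class_mapper := by
  intro n _
  unfold Spec_html_name_class_mapper html_name_class_mapper html_name_class_mapper_alt
  have hitems : pvHtmlClasses.items = [
      ("heading", ["h1", "h2", "h3", "h4", "h5", "h6"]),
      ("text", ["p", "br", "hr", "span", "b"]),
      ("list", ["ul", "ol", "li", "dl", "dt", "dd"]),
      ("link", ["a", "link"]),
      ("meta", ["head", "meta"]),
      ("table", ["table", "tr", "td"]),
      ("media", ["img", "audio", "video"]),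
      ("form", ["form", "input", "button", "label", "select", "textarea"]),
      ("container", ["div", "header", "footer", "nav", "main", "article", "section", "aside", "figure", "figcaption"])] := by decide
  have hd : pvCategoryOf = PySem.Dict.mk [("h1", "heading"), ("h2", "heading"), ("h3", "heading"), ("h4", "heading"), ("h5", "heading"), ("h6", "heading"), ("p", "text"), ("br", "text"), ("hr", "text"), ("span", "text"), ("b", "text"), ("ul", "list"), ("ol", "list"), ("li", "list"), ("dl", "list"), ("dt", "list"), ("dd", "list"), ("a", "link"), ("link", "link"), ("head", "meta"), ("meta", "meta"), ("table", "table"), ("tr", "table"), ("td", "table"), ("img", "media"), ("audio", "media"), ("video", "media"), ("form", "form"), ("input", "form"), ("button", "form"), ("label", "form"), ("select", "form"), ("textarea", "form"), ("div", "container"), ("header", "container"), ("footer", "container"), ("nav", "container"), ("main", "container"), ("article", "container"), ("section", "container"), ("aside", "container"), ("figure", "container"), ("figcaption", "container")] := by decide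
  rw [hd, hitems]
  simp only [pvMapperLoop, PySem.Dict.getD, PySem.Dict.get?_mk_cons, List.mem_cons,
    List.mem_singleton, List.not_mem_nil, or_false]
  by_cases h : n ∈ ["h1", "h2", "h3", "h4", "h5", "h6", "p", "br", "hr", "span", "b", "ul", "ol", "li", "dl", "dt", "dd", "a", "link", "head", "meta", "table", "tr", "td", "img", "audio", "video", "form", "input", "button", "label", "select", "textarea", "div", "header", "footer", "nav", "main", "article", "section", "aside", "figure", "figcaption"]
  · fin_cases h <;> decide
  · simp only [List.mem_cons, List.not_mem_nil, or_false, not_or] at h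
    obtain ⟨h1, h2, h3, h4, h5, h6, h7, h8, h9, h10, h11, h12, h13, h14, h15, h16, h17, h18,
      h19, h20, h21, h22, h23, h24, h25, h26, h27, h28, h29, h30, h31, h32, h33, h34, h35,
      h36, h37, h38, h39, h40, h41, h42, h43⟩ := h
    have g1 : ("h1" = n) = False := by simp; exact fun e => h1 e.symm
    have g2 : ("h2" = n) = False := by simp; exact fun e => h2 e.symm
    have g3 : ("h3" = n) = False := by simp; exact fun e => h3 e.symm
    have g4 : ("h4" = n) = False := by simp; exact fun e => h4 e.symm
    have g5 : ("h5" = n) = False := by simp; exact fun e => h5 e.symm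
    have g6 : ("h6" = n) = False := by simp; exact fun e => h6 e.symm
    have g7 : ("p" = n) = False := by simp; exact fun e => h7 e.symm
    have g8 : ("br" = n) = False := by simp; exact fun e => h8 e.symm
    have g9 : ("hr" = n) = False := by simp; exact fun e => h9 e.symm
    have g10 : ("span" = n) = False := by simp; exact fun e => h10 e.symm
    have g11 : ("b" = n) = False := by simp; exact fun e => h11 e.symm
    have g12 : ("ul" = n) = False := by simp; exact fun e => h12 e.symm
    have g13 : ("ol" = n) = False := by simp; exact fun e => h13 e.symm
    have g14 : ("li" = n) = False := by simp; exact fun e => h14 e.symm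
    have g15 : ("dl" = n) = False := by simp; exact fun e => h15 e.symm
    have g16 : ("dt" = n) = False := by simp; exact fun e => h16 e.symm
    have g17 : ("dd" = n) = False := by simp; exact fun e => h17 e.symm
    have g18 : ("a" = n) = False := by simp; exact fun e => h18 e.symm
    have g19 : ("link" = n) = False := by simp; exact fun e => h19 e.symm
    have g20 : ("head" = n) = False := by simp; exact fun e => h20 e.symm
    have g21 : ("meta" = n) = False := by simp; exact fun e => h21 e.symm
    have g22 : ("table" = n) = False := by simp; exact fun e => h22 e.symm
    have g23 : ("tr" = n) = False := by simp; exact fun e => h23 e.symm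
    have g24 : ("td" = n) = False := by simp; exact fun e => h24 e.symm
    have g25 : ("img" = n) = False := by simp; exact fun e => h25 e.symm
    have g26 : ("audio" = n) = False := by simp; exact fun e => h26 e.symm
    have g27 : ("video" = n) = False := by simp; exact fun e => h27 e.symm
    have g28 : ("form" = n) = False := by simp; exact fun e => h28 e.symm
    have g29 : ("input" = n) = False := by simp; exact fun e => h29 e.symm
    have g30 : ("button" = n) = False := by simp; exact fun e => h30 e.symm
    have g31 : ("label" = n) = False := by simp; exact fun e => h31 e.symm
    have g32 : ("select" = n) = False := by simp; exact fun e => h32 e.symm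
    have g33 : ("textarea" = n) = False := by simp; exact fun e => h33 e.symm
    have g34 : ("div" = n) = False := by simp; exact fun e => h34 e.symm
    have g35 : ("header" = n) = False := by simp; exact fun e => h35 e.symm
    have g36 : ("footer" = n) = False := by simp; exact fun e => h36 e.symm
    have g37 : ("nav" = n) = False := by simp; exact fun e => h37 e.symm
    have g38 : ("main" = n) = False := by simp; exact fun e => h38 e.symm
    have g39 : ("article" = n) = False := by simp; exact fun e => h39 e.symm
    have g40 : ("section" = n) = False := by simp; exact fun e => h40 e.symm
    have g41 : ("aside" = n) = False := by simp; exact fun e => h41 e.symm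
    have g42 : ("figure" = n) = False := by simp; exact fun e => h42 e.symm
    have g43 : ("figcaption" = n) = False := by simp; exact fun e => h43 e.symm
    have hh1 : (n = "h1") = False := by simp [h1]
    have hh2 : (n = "h2") = False := by simp [h2]
    have hh3 : (n = "h3") = False := by simp [h3]
    have hh4 : (n = "h4") = False := by simp [h4]
    have hh5 : (n = "h5") = False := by simp [h5]
    have hh6 : (n = "h6") = False := by simp [h6]
    have hh7 : (n = "p") = False := by simp [h7]
    have hh8 : (n = "br") = False := by simp [h8]
    have hh9 : (n = "hr") = False := by simp [h9]
    have hh10 : (n = "span") = False := by simp [h10]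
    have hh11 : (n = "b") = False := by simp [h11]
    have hh12 : (n = "ul") = False := by simp [h12]
    have hh13 : (n = "ol") = False := by simp [h13]
    have hh14 : (n = "li") = False := by simp [h14]
    have hh15 : (n = "dl") = False := by simp [h15]
    have hh16 : (n = "dt") = False := by simp [h16]
    have hh17 : (n = "dd") = False := by simp [h17]
    have hh18 : (n = "a") = False := by simp [h18]
    have hh19 : (n = "link") = False := by simp [h19]
    have hh20 : (n = "head") = False := by simp [h20]
    have hh21 : (n = "meta") = False := by simp [h21]
    have hh22 : (n = "table") = False := by simp [h22]
    have hh23 : (n = "tr") = False := by simp [h23]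
    have hh24 : (n = "td") = False := by simp [h24]
    have hh25 : (n = "img") = False := by simp [h25]
    have hh26 : (n = "audio") = False := by simp [h26]
    have hh27 : (n = "video") = False := by simp [h27]
    have hh28 : (n = "form") = False := by simp [h28]
    have hh29 : (n = "input") = False := by simp [h29]
    have hh30 : (n = "button") = False := by simp [h30]
    have hh31 : (n = "label") = False := by simp [h31]
    have hh32 : (n = "select") = False := by simp [h32]
    have hh33 : (n = "textarea") = False := by simp [h33]
    have hh34 : (n = "div") = False := by simp [h34]
    have hh35 : (n = "header") = False := by simp [h35]
    have hh36 : (n = "footer") = False := by simp [h36]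
    have hh37 : (n = "nav") = False := by simp [h37]
    have hh38 : (n = "main") = False := by simp [h38]
    have hh39 : (n = "article") = False := by simp [h39]
    have hh40 : (n = "section") = False := by simp [h40]
    have hh41 : (n = "aside") = False := by simp [h41]
    have hh42 : (n = "figure") = False := by simp [h42]
    have hh43 : (n = "figcaption") = False := by simp [h43]
    simp only [beq_iff_eq, g1, g2, g3, g4, g5, g6, g7, g8, g9, g10, g11, g12, g13, g14, g15, g16, g17, g18, g19, g20, g21, g22, g23, g24, g25, g26, g27, g28, g29, g30, g31, g32, g33, g34, g35, g36, g37, g38, g39, g40, g41, g42, g43, hh1, hh2, hh3, hh4, hh5, hh6, hh7, hh8, hh9, hh10, hh11, hh12, hh13, hh14, hh15, hh16, hh17, hh18, hh19, hh20, hh21, hh22, hh23, hh24, hh25, hh26, hh27, hh28, hh29, hh30, hh31, hh32, hh33, hh34, hh35, hh36, hh37, hh38, hh39, hh40, hh41, hh42, hh43, or_self, false_or, if_false]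
    rfl
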